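-- pv_equiv track=rewrite | github.com/Chummy26/scanner | backend/src/spread/ml_dataset.py | _block_threshold_counts
-- ===== SOURCE A (Python) =====
-- def _block_threshold_counts(record_counts: list[int]) -> dict[str, int]:
--     thresholds = {
--         "ge_8": 8,
--         "ge_10": 10,
--         "ge_12": 12,
--         "ge_15": 15,
--         "ge_20": 20,
--     }
--     return {
--         label: int(sum(1 for record_count in record_counts if int(record_count) >= minimum))
--         for label, minimum in thresholds.items()
--     }
-- ===== SOURCE B (Python) =====
-- def _block_threshold_counts(record_counts: list[int]) -> dict[str, int]:
--     counts = {"ge_8": 0, "ge_10": 0, "ge_12": 0, "ge_15": 0, "ge_20": 0}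
--     for record_count in record_counts:
--         v = int(record_count)
--         if v >= 8:
--             counts["ge_8"] += 1
--             if v >= 10:
--                 counts["ge_10"] += 1
--                 if v >= 12:
--                     counts["ge_12"] += 1
--                     if v >= 15:
--                         counts["ge_15"] += 1
--                         if v >= 20:
--                             counts["ge_20"] += 1
--     return counts
-- ===== Notes on version B (the rewrite author's own statement) =====
-- stated objective: alternative
-- what changed: Replaces five separate generator-sum passes (one per threshold) with a single loop over record_counts that updates all five counters via nested threshold checks, exploiting that the thresholds are increasing.
import Mathlib
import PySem

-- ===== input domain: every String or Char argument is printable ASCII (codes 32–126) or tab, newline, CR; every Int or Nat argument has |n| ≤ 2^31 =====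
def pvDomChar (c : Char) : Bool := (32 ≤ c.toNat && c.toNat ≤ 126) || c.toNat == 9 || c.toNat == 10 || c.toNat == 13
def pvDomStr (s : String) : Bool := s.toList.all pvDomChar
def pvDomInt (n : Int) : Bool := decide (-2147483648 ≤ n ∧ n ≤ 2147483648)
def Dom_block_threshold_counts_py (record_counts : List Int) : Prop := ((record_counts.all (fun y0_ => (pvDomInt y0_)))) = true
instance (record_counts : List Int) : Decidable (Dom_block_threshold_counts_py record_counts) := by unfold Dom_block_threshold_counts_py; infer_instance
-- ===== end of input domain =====

-- B replaces A's five separate counting passes by one loop updating all five counters; alternative decomposition, return value identical.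

-- ===== PORT A =====
-- A: dict comprehension over the fixed threshold table; each value is sum(1 for rc in record_counts if rc >= minimum).
def pySumGE (record_counts : List Int) (minimum : Int) : Int :=
  record_counts.foldl (fun acc record_count => if minimum ≤ record_count then acc + 1 else acc) 0

def block_threshold_counts_py (record_counts : List Int) : List (String × Int) :=
  [("ge_8", (8 : Int)), ("ge_10", 10), ("ge_12", 12), ("ge_15", 15), ("ge_20", 20)].map
    (fun lm => (lm.1, pySumGE record_counts lm.2))

-- ===== PORT B =====
-- B: one pass; nested ifs increment each counter whose threshold v meets.
def altStep (s : Int × Int × Int × Int × Int) (v : Int) : Int × Int × Int × Int × Int :=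
  if 8 ≤ v then
    if 10 ≤ v then
      if 12 ≤ v then
        if 15 ≤ v then
          if 20 ≤ v then (s.1 + 1, s.2.1 + 1, s.2.2.1 + 1, s.2.2.2.1 + 1, s.2.2.2.2 + 1)
          else (s.1 + 1, s.2.1 + 1, s.2.2.1 + 1, s.2.2.2.1 + 1, s.2.2.2.2)
        else (s.1 + 1, s.2.1 + 1, s.2.2.1 + 1, s.2.2.2.1, s.2.2.2.2)
      else (s.1 + 1, s.2.1 + 1, s.2.2.1, s.2.2.2.1, s.2.2.2.2)
    else (s.1 + 1, s.2.1, s.2.2.1, s.2.2.2.1, s.2.2.2.2)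
  else s

def block_threshold_counts_py_alt (record_counts : List Int) : List (String × Int) :=
  let s := record_counts.foldl altStep (0, 0, 0, 0, 0)
  [("ge_8", s.1), ("ge_10", s.2.1), ("ge_12", s.2.2.1), ("ge_15", s.2.2.2.1), ("ge_20", s.2.2.2.2)]

-- ===== PRECONDITION & SPEC =====
def Spec_block_threshold_counts_py (record_counts : List Int) (out : List (String × Int)) : Prop := out = block_threshold_counts_py_alt record_counts
instance (record_counts : List Int) (out : List (String × Int)) : Decidable (Spec_block_threshold_counts_py record_counts out) := by unfold Spec_block_threshold_counts_py; infer_instance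

-- ===== CLAIM (what is proved, stated in full; the proofs are below) =====
def Claim_equal_block_threshold_counts_py : Prop := ∀ (record_counts : List Int), Dom_block_threshold_counts_py record_counts → Spec_block_threshold_counts_py record_counts (block_threshold_counts_py record_counts)

-- ===== LEMMAS AND PROOFS =====

theorem pySumGE_shift (l : List Int) (m a : Int) :
    l.foldl (fun acc rc => if m ≤ rc then acc + 1 else acc) a
      = a + l.foldl (fun acc rc => if m ≤ rc then acc + 1 else acc) 0 := by
  induction l generalizing a with
  | nil => simp
  | cons v t ih =>
      simp only [List.foldl_cons]
      rw [ih, ih (if m ≤ v then (0 : Int) + 1 else 0)]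
      split_ifs <;> ring

theorem pySumGE_cons (v : Int) (t : List Int) (m : Int) :
    pySumGE (v :: t) m = (if m ≤ v then 1 else 0) + pySumGE t m := by
  simp only [pySumGE, List.foldl_cons]
  rw [pySumGE_shift]
  split_ifs <;> ring

theorem alt_fold_eq (l : List Int) (s : Int × Int × Int × Int × Int) :
    l.foldl altStep s
      = (s.1 + pySumGE l 8, s.2.1 + pySumGE l 10, s.2.2.1 + pySumGE l 12,
         s.2.2.2.1 + pySumGE l 15, s.2.2.2.2 + pySumGE l 20) := by
  induction l generalizing s with
  | nil => simp [pySumGE]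
  | cons v t ih =>
      simp only [List.foldl_cons]
      rw [ih, pySumGE_cons, pySumGE_cons, pySumGE_cons, pySumGE_cons, pySumGE_cons]
      unfold altStep
      split_ifs <;>
        refine Prod.ext ?_ (Prod.ext ?_ (Prod.ext ?_ (Prod.ext ?_ ?_))) <;> simp <;> omega

-- ===== VERDICT (by name: the statement is the Claim_ definition above) =====
theorem block_threshold_counts_py_spec : Claim_equal_block_threshold_counts_py := by
  intro l _
  unfold Spec_block_threshold_counts_py block_threshold_counts_py block_threshold_counts_py_alt
  rw [alt_fold_eq]
  simp
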